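-- pv_equiv track=rewrite | github.com/UserNombre/OStealth | dashboard/p0f.log/app.py | parse_p0f_log
-- ===== SOURCE A (Python) =====
-- def parse_p0f_log(text):
--     sessions = []
--     current = {}
--
--     for line in text.splitlines():
--         line = line.strip()
--         if not line:
--             continue
--
--         if line.startswith("-[") and line.endswith("]-"):
--             if current:
--                 sessions.append(current)
--             current = {"header": line}
--
--         elif "=" in line:
--             key, val = line.split("=", 1)
--             current[key.strip()] = val.strip()
--
--     if current:
--         sessions.append(current)
--
--     return sessions
-- ===== SOURCE B (Python) =====
-- def parse_p0f_log(text):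
--     lines = [s for s in (l.strip() for l in text.splitlines()) if s]
--
--     def is_header(l):
--         return l.startswith("-[") and l.endswith("]-")
--
--     # pass 1: group lines into segments, a new segment starts at each header
--     segments = []
--     seg = []
--     for l in lines:
--         if is_header(l):
--             segments.append(seg)
--             seg = [l]
--         else:
--             seg.append(l)
--     segments.append(seg)
--
--     # pass 2: turn each segment into a dict; keep only non-empty dicts
--     result = []
--     for seg in segments:
--         d = {}
--         if seg and is_header(seg[0]):
--             d["header"] = seg[0]
--             body = seg[1:]
--         else:
--             body = seg
--         for l in body:
--             if "=" in l:
--                 k, v = l.split("=", 1)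
--                 d[k.strip()] = v.strip()
--         if d:
--             result.append(d)
--     return result
-- ===== Notes on version B (the rewrite author's own statement) =====
-- stated objective: alternative
-- what changed: Replaced A's single interleaved state-machine loop (mutating a current dict and flushing it at each header and at the end) with a group-then-transform decomposition: one pass splits the cleaned lines into segments at header lines, a second pass maps each segment to its dict and keeps the non-empty ones.
import Mathlib
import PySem

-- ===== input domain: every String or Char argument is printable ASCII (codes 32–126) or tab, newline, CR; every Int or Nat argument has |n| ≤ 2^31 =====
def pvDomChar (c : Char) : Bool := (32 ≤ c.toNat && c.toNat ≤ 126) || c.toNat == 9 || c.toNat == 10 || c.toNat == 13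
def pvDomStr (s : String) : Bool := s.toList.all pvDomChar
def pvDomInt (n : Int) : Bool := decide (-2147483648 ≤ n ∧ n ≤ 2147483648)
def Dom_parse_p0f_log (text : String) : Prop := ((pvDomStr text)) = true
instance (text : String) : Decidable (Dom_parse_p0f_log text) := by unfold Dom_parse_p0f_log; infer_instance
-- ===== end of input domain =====

-- B replaces A's interleaved state-machine loop by a group-into-segments pass followed by a
-- segment-to-dict pass (alternative decomposition, same cost); return values proved equal.

-- ===== PORT A =====
-- line.startswith("-[") and line.endswith("]-")
def pvIsHeader (l : String) : Bool :=
  PySem.Str.startswith l "-[" && PySem.Str.endswith l "]-"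

-- the 'elif "=" in line: key, val = line.split("=", 1); current[key.strip()] = val.strip()' step
-- (shared by both ports; if "=" is absent the line is ignored)
def pvExtend (d : PySem.Dict String String) (line : String) : PySem.Dict String String :=
  if PySem.Str.isIn "=" line then
    match PySem.Str.splitMax? line "=" 1 with
    | some (key :: val :: _) => d.insert (PySem.Str.strip key) (PySem.Str.strip val)
    | _ => d
  else d

-- A's for-loop over text.splitlines() with state (sessions, current); the trailing
-- 'if current: sessions.append(current)' is the base case
def pvLoopA : List String → List (List (String × String)) → PySem.Dict String String →
    List (List (String × String))
  | [], sessions, current => if current.items ≠ [] then sessions ++ [current.items] else sessions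
  | raw :: rest, sessions, current =>
    let line := PySem.Str.strip raw
    if line = "" then pvLoopA rest sessions current
    else if pvIsHeader line then
      pvLoopA rest (if current.items ≠ [] then sessions ++ [current.items] else sessions)
        (PySem.Dict.mk [("header", line)])
    else
      pvLoopA rest sessions (pvExtend current line)

def parse_p0f_log (text : String) : List (List (String × String)) :=
  pvLoopA (PySem.Str.splitlines text) [] (PySem.Dict.mk [])

-- ===== PORT B =====
-- pass 1 of Source B: split the cleaned lines into segments, new segment at each header
def pvSegment : List String → List String → List (List String)
  | [], seg => [seg]
  | l :: rest, seg =>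
    if pvIsHeader l then seg :: pvSegment rest [l] else pvSegment rest (seg ++ [l])

-- pass 2 of Source B: one segment to its dict
def pvSegDict : List String → PySem.Dict String String
  | [] => PySem.Dict.mk []
  | h :: t =>
    if pvIsHeader h then t.foldl pvExtend (PySem.Dict.mk [("header", h)])
    else (h :: t).foldl pvExtend (PySem.Dict.mk [])

def parse_p0f_log_alt (text : String) : List (List (String × String)) :=
  let lines := ((PySem.Str.splitlines text).map PySem.Str.strip).filter (· ≠ "")
  let segments := pvSegment lines []
  (((segments.map pvSegDict).filter (fun d => d.items ≠ [])).map PySem.Dict.items)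

-- ===== PRECONDITION & SPEC =====
def Spec_parse_p0f_log (text : String) (out : List (List (String × String))) : Prop := out = parse_p0f_log_alt text
instance (text : String) (out : List (List (String × String))) : Decidable (Spec_parse_p0f_log text out) := by unfold Spec_parse_p0f_log; infer_instance

-- ===== CLAIM (what is proved, stated in full; the proofs are below) =====
def Claim_equal_parse_p0f_log : Prop := ∀ (text : String), Dom_parse_p0f_log text → Spec_parse_p0f_log text (parse_p0f_log text)

-- ===== LEMMAS AND PROOFS =====

-- common reference function: processes the cleaned lines with the current dict as state,
-- returning only the sessions the remaining lines contribute
def pvRun : List String → PySem.Dict String String → List (List (String × String))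
  | [], d => if d.items ≠ [] then [d.items] else []
  | l :: r, d =>
    if pvIsHeader l then
      (if d.items ≠ [] then [d.items] else []) ++ pvRun r (PySem.Dict.mk [("header", l)])
    else pvRun r (pvExtend d l)

theorem pvLoopA_eq_run (raws : List String) :
    ∀ (sessions : List (List (String × String))) (d : PySem.Dict String String),
    pvLoopA raws sessions d =
      sessions ++ pvRun (((raws.map PySem.Str.strip).filter (· ≠ ""))) d := by
  induction raws with
  | nil => intro sessions d; simp [pvLoopA, pvRun]; split <;> simp
  | cons raw rest ih =>
    intro sessions d
    by_cases h0 : PySem.Str.strip raw = ""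
    · simp [pvLoopA, h0, ih]
    · by_cases hh : pvIsHeader (PySem.Str.strip raw) = true
      · simp only [pvLoopA, List.map_cons, List.filter_cons]
        rw [if_neg h0, if_pos hh, ih]
        by_cases hd : d.items = [] <;> simp [h0, hh, pvRun, hd, List.append_assoc]
      · simp only [Bool.not_eq_true] at hh
        simp [pvLoopA, h0, hh, ih, pvRun]

theorem pvSegDict_append (seg : List String) (l : String) (hl : pvIsHeader l = false) :
    pvSegDict (seg ++ [l]) = pvExtend (pvSegDict seg) l := by
  cases seg with
  | nil => simp [pvSegDict, hl]
  | cons h t =>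
    simp only [List.cons_append, pvSegDict]
    split <;> simp [List.foldl_append]

theorem pvSegment_eq_run (lines : List String) :
    ∀ (seg : List String),
    ((((pvSegment lines seg).map pvSegDict).filter (fun d => d.items ≠ [])).map PySem.Dict.items)
      = pvRun lines (pvSegDict seg) := by
  induction lines with
  | nil =>
    intro seg
    simp only [pvSegment, pvRun, List.map_cons, List.map_nil, List.filter]
    split <;> simp_all
  | cons l rest ih =>
    intro seg
    by_cases hh : pvIsHeader l = true
    · have hseed : pvSegDict [l] = PySem.Dict.mk [("header", l)] := by
        simp [pvSegDict, hh, List.foldl]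
      simp only [pvSegment, pvRun, hh]
      rw [← hseed, ← ih [l]]
      by_cases hd : (pvSegDict seg).items = [] <;> simp [hd]
    · simp only [Bool.not_eq_true] at hh
      simp only [pvSegment, pvRun, hh, Bool.false_eq_true, if_false]
      rw [ih, pvSegDict_append seg l hh]

-- ===== VERDICT (by name: the statement is the Claim_ definition above) =====
theorem parse_p0f_log_spec : Claim_equal_parse_p0f_log := by
  intro text _
  unfold Spec_parse_p0f_log parse_p0f_log parse_p0f_log_alt
  rw [pvLoopA_eq_run, pvSegment_eq_run]
  simp [pvSegDict]
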